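-- pv_equiv track=rewrite | github.com/turingarena/turingarena | turingarena/tests/test_interface_compilation.py | interface_testcases
-- ===== SOURCE A (Python) =====
-- def interface_testcases(lines):
--     k = None
--     title = None
--     marker = "=== "
--     for i, line in enumerate(lines + [marker]):
--         if line.startswith(marker):
--             if k is not None:
--                 yield title, lines[k + 1:i]
--             k = i
--             title = line[len(marker):].strip()
-- ===== SOURCE B (Python) =====
-- def interface_testcases(lines):
--     marker = "=== "
--     title = None
--     body = []
--     started = False
--     for line in lines:
--         if line.startswith(marker):
--             if started:
--                 yield title, body
--             title = line[len(marker):].strip()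
--             body = []
--             started = True
--         elif started:
--             body.append(line)
--     if started:
--         yield title, body
-- ===== Notes on version B (the rewrite author's own statement) =====
-- stated objective: alternative
-- what changed: Replaces A's sentinel-append (lines + [marker]) and index-bookkeeping with re-slicing of the original list by a single forward pass that accumulates the current section body directly and flushes it at each marker and at the end.
import Mathlib
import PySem

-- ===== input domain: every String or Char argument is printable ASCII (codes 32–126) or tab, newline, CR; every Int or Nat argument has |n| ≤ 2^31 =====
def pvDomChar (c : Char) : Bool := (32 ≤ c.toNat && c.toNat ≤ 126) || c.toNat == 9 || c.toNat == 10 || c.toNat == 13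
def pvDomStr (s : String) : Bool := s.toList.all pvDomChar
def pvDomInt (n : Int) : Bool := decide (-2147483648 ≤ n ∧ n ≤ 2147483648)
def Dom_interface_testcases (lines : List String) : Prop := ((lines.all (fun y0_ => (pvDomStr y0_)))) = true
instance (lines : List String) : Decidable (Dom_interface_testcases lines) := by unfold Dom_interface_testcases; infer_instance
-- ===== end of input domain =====

-- B replaces A's sentinel-append and index/slice bookkeeping with a single pass that
-- accumulates each section body directly (alternative decomposition, same cost).
-- Both Pythons are generators; equivalence is about the yielded sequence (as a list).

-- ===== PORT A =====
def pvMarker : String := "=== "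

-- one iteration of A's for-loop body; state = (k, title, yielded-so-far)
def pvStepA (lines : List String)
    (st : Option Int × Option String × List (String × List String))
    (p : Int × String) : Option Int × Option String × List (String × List String) :=
  if PySem.Str.startswith p.2 pvMarker then
    let out := match st.1 with
      | some kk => st.2.2 ++ [((st.2.1).getD "", PySem.List.slice lines (some (kk + 1)) (some p.1))]
      | none => st.2.2
    (some p.1,
     some (PySem.Str.strip (PySem.Str.slice p.2 (some (PySem.Str.len pvMarker : Int)) none)),
     out)
  else st

-- `title` is Python's None-initialised variable: it is `some _` whenever k is, so `.getD ""` is never observed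
def interface_testcases (lines : List String) : List (String × List String) :=
  ((PySem.List.enumerate (lines ++ [pvMarker]) 0).foldl (pvStepA lines) (none, none, [])).2.2

-- ===== PORT B =====
-- one iteration of B's loop; state = (title, body, started, yielded-so-far)
def pvStepB (st : String × List String × Bool × List (String × List String))
    (line : String) : String × List String × Bool × List (String × List String) :=
  if PySem.Str.startswith line pvMarker then
    (PySem.Str.strip (PySem.Str.slice line (some (PySem.Str.len pvMarker : Int)) none),
     ([] : List String), true,
     if st.2.2.1 then st.2.2.2 ++ [(st.1, st.2.1)] else st.2.2.2)
  else if st.2.2.1 then (st.1, st.2.1 ++ [line], st.2.2.1, st.2.2.2) else st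

def interface_testcases_alt (lines : List String) : List (String × List String) :=
  let st := lines.foldl pvStepB ("", [], false, [])
  if st.2.2.1 then st.2.2.2 ++ [(st.1, st.2.1)] else st.2.2.2

-- ===== PRECONDITION & SPEC =====
def Spec_interface_testcases (lines : List String) (out : List (String × List String)) : Prop := out = interface_testcases_alt lines
instance (lines : List String) (out : List (String × List String)) : Decidable (Spec_interface_testcases lines out) := by unfold Spec_interface_testcases; infer_instance

-- ===== CLAIM (what is proved, stated in full; the proofs are below) =====
def Claim_equal_interface_testcases : Prop := ∀ (lines : List String), Dom_interface_testcases lines → Spec_interface_testcases lines (interface_testcases lines)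

-- ===== LEMMAS AND PROOFS =====

-- B's post-loop flush
def pvFlushB (st : String × List String × Bool × List (String × List String)) : List (String × List String) :=
  if st.2.2.1 then st.2.2.2 ++ [(st.1, st.2.1)] else st.2.2.2

lemma pvEnumAppend (xs : List String) (y : String) (s : Int) :
    PySem.List.enumerate (xs ++ [y]) s
      = PySem.List.enumerate xs s ++ [(s + xs.length, y)] := by
  induction xs generalizing s with
  | nil => simp [PySem.List.enumerate_nil, PySem.List.enumerate_cons]
  | cons x xs ih =>
      simp [PySem.List.enumerate_cons, ih]
      ring_nf

lemma pvMain (lines : List String) :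
    ∀ (rest : List String) (i : Nat), lines.drop i = rest →
    ∀ (kA : Option Int) (tA : Option String) (out : List (String × List String))
      (tB : String) (body : List String) (started : Bool),
      ((kA = none ∧ tA = none ∧ started = false) ∨
       (∃ j : Nat, kA = some (j : Int) ∧ tA = some tB ∧ started = true ∧ j + 1 ≤ i ∧
          body = (lines.drop (j + 1)).take (i - (j + 1)))) →
      (pvStepA lines ((PySem.List.enumerate rest (i : Int)).foldl (pvStepA lines) (kA, tA, out))
        ((lines.length : Int), pvMarker)).2.2
        = pvFlushB (rest.foldl pvStepB (tB, body, started, out)) := by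
  have hmm : PySem.Str.startswith pvMarker pvMarker = true := by decide
  intro rest
  induction rest with
  | nil =>
      intro i hdrop kA tA out tB body started hinv
      have hlen : lines.length ≤ i := by
        have := congrArg List.length hdrop
        simp at this; omega
      rcases hinv with ⟨hk, ht, hs⟩ | ⟨j, hk, ht, hs, hji, hbody⟩
      · subst hk; subst hs
        simp only [PySem.List.enumerate_nil, List.foldl_nil, pvStepA, pvFlushB]
        rw [if_pos hmm]; simp
      · subst hk; subst ht; subst hs
        have h2 : body = lines.drop (j + 1) := by
          rw [hbody, List.take_of_length_le]; simp; omega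
        simp only [PySem.List.enumerate_nil, List.foldl_nil, pvStepA, pvFlushB]
        rw [if_pos hmm]
        simp only [Option.getD_some]
        rw [show ((j : Int) + 1) = ((j + 1 : Nat) : Int) by push_cast; ring,
            show ((lines.length : Int)) = ((lines.length : Nat) : Int) by rfl,
            PySem.List.slice_natCast, h2]
        have h1 : (lines.drop (j + 1)).take (lines.length - (j + 1)) = lines.drop (j + 1) := by
          rw [List.take_of_length_le]; simp
        rw [h1]; simp
  | cons line rest ih =>
      intro i hdrop kA tA out tB body started hinv
      have hget : lines[i]? = some line := by
        have : (lines.drop i)[0]? = some line := by rw [hdrop]; rfl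
        simpa using this
      have hdrop' : lines.drop (i + 1) = rest := by
        have : (lines.drop i).drop 1 = rest := by rw [hdrop]; rfl
        simpa [List.drop_drop, Nat.add_comm] using this
      rw [PySem.List.enumerate_cons]
      simp only [List.foldl_cons]
      rw [show ((i : Int) + 1) = ((i + 1 : Nat) : Int) by push_cast; ring]
      rcases hinv with ⟨hk, ht, hs⟩ | ⟨j, hk, ht, hs, hji, hbody⟩
      · subst hk; subst ht; subst hs
        by_cases hm : PySem.Str.startswith line pvMarker = true
        · rw [show pvStepA lines (none, none, out) ((i : Int), line)
                = (some (i : Int),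
                   some (PySem.Str.strip (PySem.Str.slice line (some (PySem.Str.len pvMarker : Int)) none)),
                   out) by simp only [pvStepA]; rw [if_pos hm],
              show pvStepB (tB, body, false, out) line
                = (PySem.Str.strip (PySem.Str.slice line (some (PySem.Str.len pvMarker : Int)) none),
                   ([] : List String), true, out) by simp only [pvStepB]; rw [if_pos hm]; simp]
          exact ih (i + 1) hdrop' _ _ _ _ _ _ (Or.inr ⟨i, rfl, rfl, rfl, le_refl _, by simp⟩)
        · rw [show pvStepA lines (none, none, out) ((i : Int), line) = (none, none, out) by
                simp only [pvStepA]; rw [if_neg hm],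
              show pvStepB (tB, body, false, out) line = (tB, body, false, out) by
                simp only [pvStepB]; rw [if_neg hm]; simp]
          exact ih (i + 1) hdrop' _ _ _ _ _ _ (Or.inl ⟨rfl, rfl, rfl⟩)
      · subst hk; subst ht; subst hs
        by_cases hm : PySem.Str.startswith line pvMarker = true
        · have hsl : PySem.List.slice lines (some ((j : Int) + 1)) (some (i : Int)) = body := by
            rw [show ((j : Int) + 1) = ((j + 1 : Nat) : Int) by push_cast; ring,
                PySem.List.slice_natCast, ← hbody]
          rw [show pvStepA lines (some (j : Int), some tB, out) ((i : Int), line)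
                = (some (i : Int),
                   some (PySem.Str.strip (PySem.Str.slice line (some (PySem.Str.len pvMarker : Int)) none)),
                   out ++ [(tB, body)]) by
                simp only [pvStepA]; rw [if_pos hm]; simp only [Option.getD_some, hsl],
              show pvStepB (tB, body, true, out) line
                = (PySem.Str.strip (PySem.Str.slice line (some (PySem.Str.len pvMarker : Int)) none),
                   ([] : List String), true, out ++ [(tB, body)]) by
                simp only [pvStepB]; rw [if_pos hm]; simp]
          exact ih (i + 1) hdrop' _ _ _ _ _ _ (Or.inr ⟨i, rfl, rfl, rfl, le_refl _, by simp⟩)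
        · have hbody' : body ++ [line] = (lines.drop (j + 1)).take (i + 1 - (j + 1)) := by
            rw [show i + 1 - (j + 1) = (i - (j + 1)) + 1 by omega, List.take_add_one]
            have hg : (lines.drop (j + 1))[i - (j + 1)]? = some line := by
              rw [List.getElem?_drop, show j + 1 + (i - (j + 1)) = i by omega, hget]
            rw [hg, hbody]; rfl
          rw [show pvStepA lines (some (j : Int), some tB, out) ((i : Int), line)
                = (some (j : Int), some tB, out) by simp only [pvStepA]; rw [if_neg hm],
              show pvStepB (tB, body, true, out) line = (tB, body ++ [line], true, out) by
                simp only [pvStepB]; rw [if_neg hm]; simp]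
          exact ih (i + 1) hdrop' _ _ _ _ _ _
            (Or.inr ⟨j, rfl, rfl, rfl, by omega, hbody'.symm ▸ rfl⟩)

-- ===== VERDICT (by name: the statement is the Claim_ definition above) =====
theorem interface_testcases_spec : Claim_equal_interface_testcases := by
  intro lines _
  unfold Spec_interface_testcases interface_testcases interface_testcases_alt
  rw [pvEnumAppend, List.foldl_append]
  simp only [List.foldl_cons, List.foldl_nil, zero_add]
  have := pvMain lines lines 0 (by simp) none none [] "" [] false (Or.inl ⟨rfl, rfl, rfl⟩)
  simpa [pvFlushB] using this
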